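-- pv_equiv track=rewrite | github.com/acsone/odoo-sort-manifest-depends | src/odoo_sort_manifest_depends/sort_manifest_deps.py | _generate_depends_sections
-- ===== SOURCE A (Python) =====
-- def _generate_depends_sections(dict_depends_by_category: dict[str, list[str]]) -> str:
--     new_content = '"depends": ['
--     # Define the preferred category order
--     category_order = ["Odoo Community", "Odoo Enterprise"]
--
--     # Separate OCA categories (start with "OCA" - includes both "OCA/" and "OCA") and local categories
--     oca_categories = []
--     local_categories = []
--     other_categories = []
--
--     for category in dict_depends_by_category.keys():
--         if category.startswith("OCA"):  # Includes both "OCA/" and "OCA"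
--             oca_categories.append(category)
--         elif category not in category_order and category != "Third-party":
--             local_categories.append(category)
--         else:
--             other_categories.append(category)
--
--     # Sort OCA categories alphabetically
--     oca_categories.sort()
--
--     # Build the final category order
--     final_order = []
--     final_order.extend(category_order)
--     final_order.extend(oca_categories)
--     final_order.append("Third-party")
--     final_order.extend(sorted(local_categories))
--
--     # Generate content in the correct order
--     for category in final_order:
--         if category in dict_depends_by_category:
--             deps = dict_depends_by_category[category]
--             if deps:
--                 new_content += (
--                     f"\n        # {category}\n        " + ",\n        ".join(f'"{dep}"' for dep in deps) + ","
--                 )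
--     new_content += "\n    ]"
--
--     return new_content
-- ===== SOURCE B (Python) =====
-- def _generate_depends_sections(dict_depends_by_category: dict[str, list[str]]) -> str:
--     def sort_key(category):
--         if category == "Odoo Community":
--             rank = "0"
--         elif category == "Odoo Enterprise":
--             rank = "1"
--         elif category.startswith("OCA"):
--             rank = "2"
--         elif category == "Third-party":
--             rank = "3"
--         else:
--             rank = "4"
--         return rank + category
--
--     blocks = []
--     for category in sorted(dict_depends_by_category, key=sort_key):
--         deps = dict_depends_by_category[category]
--         if deps:
--             blocks.append(
--                 f"\n        # {category}\n        "
--                 + ",\n        ".join(f'"{dep}"' for dep in deps)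
--                 + ","
--             )
--     return '"depends": [' + "".join(blocks) + "\n    ]"
-- ===== Notes on version B (the rewrite author's own statement) =====
-- stated objective: simpler
-- what changed: Replaces A's three explicit bucket lists plus hand-assembled final order with a single sort of the dict's keys under a rank-plus-name key, emitting the blocks in one pass over the sorted keys; Pre_ only excludes assoc lists with duplicate keys, which cannot arise from a Python dict.
import Mathlib
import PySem

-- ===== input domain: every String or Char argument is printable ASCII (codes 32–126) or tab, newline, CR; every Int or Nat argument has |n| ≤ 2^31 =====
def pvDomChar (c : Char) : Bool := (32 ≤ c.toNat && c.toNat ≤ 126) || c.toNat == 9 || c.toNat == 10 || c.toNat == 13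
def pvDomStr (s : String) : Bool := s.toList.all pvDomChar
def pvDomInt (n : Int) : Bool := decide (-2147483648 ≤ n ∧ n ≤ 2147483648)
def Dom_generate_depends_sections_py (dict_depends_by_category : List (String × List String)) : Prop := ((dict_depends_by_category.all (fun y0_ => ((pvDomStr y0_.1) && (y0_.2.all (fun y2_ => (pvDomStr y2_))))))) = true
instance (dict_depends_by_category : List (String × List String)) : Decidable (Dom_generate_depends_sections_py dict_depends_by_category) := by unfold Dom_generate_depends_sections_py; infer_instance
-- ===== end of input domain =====

-- B replaces A's three bucket lists with one sort of the keys under a rank-plus-name key (simpler decomposition, same output).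

-- ===== PORT A =====
-- shared formatting helper: the block both Pythons emit for one category (same f-string + join in A and B)
def pvBlock (category : String) (deps : List String) : String :=
  "\n        # " ++ category ++ "\n        " ++
    PySem.Str.join ",\n        " (deps.map (fun dep => "\"" ++ dep ++ "\"")) ++ ","

def generate_depends_sections_py (dict_depends_by_category : List (String × List String)) : String :=
  let d := PySem.Dict.mk dict_depends_by_category
  let category_order : List String := ["Odoo Community", "Odoo Enterprise"]
  -- the three-bucket partition loop over the dict's keys
  let buckets := d.keys.foldl
    (fun (acc : List String × List String × List String) category =>
      if PySem.Str.startswith category "OCA" then (acc.1 ++ [category], acc.2.1, acc.2.2)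
      else if category ∉ category_order ∧ category ≠ "Third-party" then (acc.1, acc.2.1 ++ [category], acc.2.2)
      else (acc.1, acc.2.1, acc.2.2 ++ [category]))
    ([], [], [])
  let oca_categories := PySem.List.sorted buckets.1 (fun c => c)
  let final_order := category_order ++ oca_categories ++ ["Third-party"] ++ PySem.List.sorted buckets.2.1 (fun c => c)
  let new_content := final_order.foldl
    (fun new_content category =>
      if d.contains category then
        let deps := d.getD category []
        if deps ≠ [] then new_content ++ pvBlock category deps else new_content
      else new_content)
    "\"depends\": ["
  new_content ++ "\n    ]"

-- ===== PORT B =====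
def pvRank (category : String) : String :=
  if category = "Odoo Community" then "0"
  else if category = "Odoo Enterprise" then "1"
  else if PySem.Str.startswith category "OCA" then "2"
  else if category = "Third-party" then "3"
  else "4"

def generate_depends_sections_py_alt (dict_depends_by_category : List (String × List String)) : String :=
  let d := PySem.Dict.mk dict_depends_by_category
  let blocks := (PySem.List.sorted d.keys (fun category => pvRank category ++ category)).foldl
    (fun blocks category =>
      let deps := d.getD category []
      if deps ≠ [] then blocks ++ [pvBlock category deps] else blocks)
    []
  "\"depends\": [" ++ PySem.Str.join "" blocks ++ "\n    ]"

-- ===== PRECONDITION & SPEC =====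
-- Pre_ excludes association lists with duplicate keys: they cannot arise from a Python dict
-- (Python collapses duplicates before the call), and on them the two assoc-list ports may honestly differ.
def Pre_generate_depends_sections_py (dict_depends_by_category : List (String × List String)) : Prop :=
  (dict_depends_by_category.map Prod.fst).Nodup
instance (dict_depends_by_category : List (String × List String)) : Decidable (Pre_generate_depends_sections_py dict_depends_by_category) := by unfold Pre_generate_depends_sections_py; infer_instance

def pvWitness_generate_depends_sections_py : (List (String × List String)) :=
  [("Odoo Community", ["base"]), ("OCA/web", ["web"]), ("my local", ["x", "y"]), ("Third-party", [])]

def Spec_generate_depends_sections_py (dict_depends_by_category : List (String × List String)) (out : String) : Prop := out = generate_depends_sections_py_alt dict_depends_by_category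
instance (dict_depends_by_category : List (String × List String)) (out : String) : Decidable (Spec_generate_depends_sections_py dict_depends_by_category out) := by unfold Spec_generate_depends_sections_py; infer_instance

-- ===== CLAIM (what is proved, stated in full; the proofs are below) =====
def Claim_equal_generate_depends_sections_py : Prop := ∀ (dict_depends_by_category : List (String × List String)), Dom_generate_depends_sections_py dict_depends_by_category → Pre_generate_depends_sections_py dict_depends_by_category → Spec_generate_depends_sections_py dict_depends_by_category (generate_depends_sections_py dict_depends_by_category)


-- ===== LEMMAS AND PROOFS =====

-- the three class predicates of A's bucket loop
def pvIsOCA (c : String) : Bool := PySem.Str.startswith c "OCA"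
def pvIsLocal (c : String) : Bool :=
  !pvIsOCA c && decide (c ∉ (["Odoo Community", "Odoo Enterprise"] : List String) ∧ c ≠ "Third-party")
def pvIsOther (c : String) : Bool :=
  !pvIsOCA c && !decide (c ∉ (["Odoo Community", "Odoo Enterprise"] : List String) ∧ c ≠ "Third-party")

-- the (at most singleton) slice of the fixed categories that are actually keys
def pvE (K : List String) (v : String) : List String := if v ∈ K then [v] else []

-- the category order A emits, as one list
def pvOrder (K : List String) : List String :=
  pvE K "Odoo Community" ++ pvE K "Odoo Enterprise" ++
    PySem.List.sorted (K.filter pvIsOCA) (fun c => c) ++ pvE K "Third-party" ++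
    PySem.List.sorted (K.filter pvIsLocal) (fun c => c)

-- lexicographic comparison of rank-prefixed keys
theorem pvRankCat_lt (ra rb a b : String) (x y : Char) (hra : ra.toList = [x]) (hrb : rb.toList = [y])
    (h : x < y ∨ (x = y ∧ a < b)) : ra ++ a < rb ++ b := by
  rw [String.lt_iff_toList_lt]
  simp only [String.toList_append, hra, hrb, List.cons_append, List.nil_append]
  show List.lt _ _
  rw [List.lt_iff_lex_lt]
  rcases h with h | ⟨rfl, hab⟩
  · exact List.Lex.rel h
  · exact List.Lex.cons ((List.lt_iff_lex_lt _ _).mp (String.lt_iff_toList_lt.mp hab))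

theorem pvRank_ofOCA (c : String) (h : pvIsOCA c = true) : pvRank c = "2" := by
  unfold pvIsOCA at h
  unfold pvRank
  split_ifs with h1 h2 <;> first
    | rfl
    | (subst_vars; exact absurd h (by decide))

theorem pvRank_ofLocal (c : String) (h : pvIsLocal c = true) : pvRank c = "4" := by
  unfold pvIsLocal pvIsOCA at h
  simp only [Bool.and_eq_true, Bool.not_eq_true', decide_eq_true_eq] at h
  obtain ⟨hoca, hmem, htp⟩ := h
  simp only [List.mem_cons, List.not_mem_nil, or_false, not_or] at hmem
  unfold pvRank
  split_ifs with h1 h2 h3 <;> first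
    | (exact absurd h1 hmem.1)
    | (exact absurd h2 hmem.2)
    | (exact absurd h3 (by rw [hoca]; exact Bool.false_ne_true))
    | rfl

theorem pv_mem_E {K : List String} {v a : String} (h : a ∈ pvE K v) : a = v ∧ a ∈ K := by
  unfold pvE at h
  split at h
  · simp only [List.mem_singleton] at h
    exact ⟨h, h ▸ ‹v ∈ K›⟩
  · simp at h

-- A's bucket loop computes the three filters
theorem pv_buckets (K : List String) (a b c : List String) :
    K.foldl
      (fun (acc : List String × List String × List String) category =>
        if PySem.Str.startswith category "OCA" then (acc.1 ++ [category], acc.2.1, acc.2.2)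
        else if category ∉ (["Odoo Community", "Odoo Enterprise"] : List String) ∧ category ≠ "Third-party" then
          (acc.1, acc.2.1 ++ [category], acc.2.2)
        else (acc.1, acc.2.1, acc.2.2 ++ [category]))
      (a, b, c)
    = (a ++ K.filter pvIsOCA, b ++ K.filter pvIsLocal, c ++ K.filter pvIsOther) := by
  induction K generalizing a b c with
  | nil => simp
  | cons k K ih =>
    simp only [List.foldl_cons, List.filter_cons]
    by_cases h1 : PySem.Str.startswith k "OCA"
    · have e1 : pvIsOCA k = true := h1
      have e2 : pvIsLocal k = false := by simp [pvIsLocal, e1]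
      have e3 : pvIsOther k = false := by simp [pvIsOther, e1]
      rw [if_pos h1, ih]
      simp [e1, e2, e3]
    · have e1 : pvIsOCA k = false := eq_false_of_ne_true h1
      by_cases h2 : k ∉ (["Odoo Community", "Odoo Enterprise"] : List String) ∧ k ≠ "Third-party"
      · have e2 : pvIsLocal k = true := by simp [pvIsLocal, e1, h2.1, h2.2]
        have e3 : pvIsOther k = false := by simp [pvIsOther, e1, h2.1, h2.2]
        rw [if_neg h1, if_pos h2, ih]
        simp [e1, e2, e3]
      · have e2 : pvIsLocal k = false := by
          unfold pvIsLocal; rw [decide_eq_false h2]; simp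
        have e3 : pvIsOther k = true := by
          unfold pvIsOther; rw [decide_eq_false h2, e1]; rfl
        rw [if_neg h1, if_neg h2, ih]
        simp [e1, e2, e3]

-- count of a list element in a filter
theorem pv_count_filter (K : List String) (p : String → Bool) (a : String) :
    List.count a (K.filter p) = if p a then List.count a K else 0 := by
  by_cases hp : p a
  · simp [List.count_filter hp, hp]
  · simp only [hp]
    exact List.count_eq_zero.mpr (fun hm => hp ((List.mem_filter.mp hm).2))

-- A's emission order is a permutation of the keys
theorem pv_perm (K : List String) (hnd : K.Nodup) : (pvOrder K).Perm K := by
  rw [List.perm_iff_count]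
  intro a
  unfold pvOrder
  simp only [List.count_append]
  rw [(PySem.List.sorted_perm (K.filter pvIsOCA) (fun c => c) false).count_eq,
      (PySem.List.sorted_perm (K.filter pvIsLocal) (fun c => c) false).count_eq,
      pv_count_filter, pv_count_filter]
  have hcE : ∀ v : String, List.count a (pvE K v) = if a = v ∧ a ∈ K then 1 else 0 := by
    intro v
    unfold pvE
    by_cases hv : v ∈ K
    · rw [if_pos hv]
      by_cases hav : a = v
      · subst hav; simp [hv]
      · rw [if_neg (show ¬(a = v ∧ a ∈ K) from fun h => hav h.1)]
        simp only [List.count_cons, List.count_nil, beq_iff_eq, Nat.zero_add]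
        rw [if_neg (fun h => hav h.symm)]
    · rw [if_neg hv, if_neg (show ¬(a = v ∧ a ∈ K) from fun h => hv (h.1 ▸ h.2))]
      simp
  rw [hcE, hcE, hcE]
  by_cases hm : a ∈ K
  · have h1 : List.count a K = 1 := List.count_eq_one_of_mem hnd hm
    rw [h1]
    by_cases hOC : a = "Odoo Community"
    · subst hOC
      rw [if_pos (show ("Odoo Community" : String) = "Odoo Community" ∧ ("Odoo Community" : String) ∈ K from ⟨rfl, hm⟩),
          if_neg (show ¬(("Odoo Community" : String) = "Odoo Enterprise" ∧ ("Odoo Community" : String) ∈ K) from fun h => absurd h.1 (by decide)),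
          (by decide : pvIsOCA "Odoo Community" = false),
          if_neg (show ¬(("Odoo Community" : String) = "Third-party" ∧ ("Odoo Community" : String) ∈ K) from fun h => absurd h.1 (by decide)),
          (by decide : pvIsLocal "Odoo Community" = false)]
      simp
    · by_cases hOE : a = "Odoo Enterprise"
      · subst hOE
        rw [if_neg (show ¬(("Odoo Enterprise" : String) = "Odoo Community" ∧ ("Odoo Enterprise" : String) ∈ K) from fun h => absurd h.1 (by decide)),
            if_pos (show ("Odoo Enterprise" : String) = "Odoo Enterprise" ∧ ("Odoo Enterprise" : String) ∈ K from ⟨rfl, hm⟩),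
            (by decide : pvIsOCA "Odoo Enterprise" = false),
            if_neg (show ¬(("Odoo Enterprise" : String) = "Third-party" ∧ ("Odoo Enterprise" : String) ∈ K) from fun h => absurd h.1 (by decide)),
            (by decide : pvIsLocal "Odoo Enterprise" = false)]
        simp
      · by_cases hTP : a = "Third-party"
        · subst hTP
          rw [if_neg (show ¬(("Third-party" : String) = "Odoo Community" ∧ ("Third-party" : String) ∈ K) from fun h => absurd h.1 (by decide)),
              if_neg (show ¬(("Third-party" : String) = "Odoo Enterprise" ∧ ("Third-party" : String) ∈ K) from fun h => absurd h.1 (by decide)),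
              (by decide : pvIsOCA "Third-party" = false),
              if_pos (show ("Third-party" : String) = "Third-party" ∧ ("Third-party" : String) ∈ K from ⟨rfl, hm⟩),
              (by decide : pvIsLocal "Third-party" = false)]
          simp
        · by_cases hOCA : pvIsOCA a = true
          · have hloc : pvIsLocal a = false := by simp [pvIsLocal, hOCA]
            rw [if_neg (show ¬(a = "Odoo Community" ∧ a ∈ K) from fun h => absurd (h.1 ▸ hOCA) (by decide)),
                if_neg (show ¬(a = "Odoo Enterprise" ∧ a ∈ K) from fun h => absurd (h.1 ▸ hOCA) (by decide)),
                hOCA,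
                if_neg (show ¬(a = "Third-party" ∧ a ∈ K) from fun h => absurd (h.1 ▸ hOCA) (by decide)),
                hloc]
            simp
          · have hOCA' : pvIsOCA a = false := eq_false_of_ne_true hOCA
            have hloc : pvIsLocal a = true := by
              unfold pvIsLocal
              rw [hOCA', decide_eq_true (show a ∉ (["Odoo Community", "Odoo Enterprise"] : List String) ∧ a ≠ "Third-party" from ⟨by simp [hOC, hOE], hTP⟩)]
              rfl
            rw [if_neg (show ¬(a = "Odoo Community" ∧ a ∈ K) from fun h => hOC h.1),
                if_neg (show ¬(a = "Odoo Enterprise" ∧ a ∈ K) from fun h => hOE h.1),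
                hOCA',
                if_neg (show ¬(a = "Third-party" ∧ a ∈ K) from fun h => hTP h.1),
                hloc]
            simp
  · have h0 : List.count a K = 0 := List.count_eq_zero.mpr hm
    rw [h0]
    simp [hm]

-- A's emission order is strictly increasing under B's sort key
theorem pv_pairwise (K : List String) (hnd : K.Nodup) :
    List.Pairwise (fun a b => pvRank a ++ a < pvRank b ++ b) (pvOrder K) := by
  have crossR : ∀ (a b : String) (x y : Char), (pvRank a).toList = [x] → (pvRank b).toList = [y] →
      x < y → pvRank a ++ a < pvRank b ++ b := fun a b x y hx hy h =>
    pvRankCat_lt _ _ _ _ x y hx hy (Or.inl h)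
  have hE : ∀ v, List.Pairwise (fun a b : String => pvRank a ++ a < pvRank b ++ b) (pvE K v) := by
    intro v; unfold pvE; split <;> simp
  have hs : ∀ (p : String → Bool) (x : Char), (∀ c, p c = true → (pvRank c).toList = [x]) →
      List.Pairwise (fun a b => pvRank a ++ a < pvRank b ++ b)
        (PySem.List.sorted (K.filter p) (fun c => c)) := by
    intro p x hr
    have h1 : List.Pairwise (fun a b : String => a ≤ b) (PySem.List.sorted (K.filter p) (fun c => c)) :=
      PySem.List.sorted_pairwise (K.filter p) (fun c => c)
    have h2 : (PySem.List.sorted (K.filter p) (fun c => c)).Nodup :=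
      (PySem.List.sorted_perm (K.filter p) (fun c => c) false).nodup_iff.mpr (hnd.filter p)
    refine (h1.and h2).imp_of_mem ?_
    intro a b ha hb hab
    have hpa : p a = true := (List.mem_filter.mp ((PySem.List.mem_sorted _ _ _ _).mp ha)).2
    have hpb : p b = true := (List.mem_filter.mp ((PySem.List.mem_sorted _ _ _ _).mp hb)).2
    exact pvRankCat_lt _ _ _ _ x x (hr a hpa) (hr b hpb)
      (Or.inr ⟨rfl, lt_of_le_of_ne hab.1 hab.2⟩)
  have mOCA : ∀ a ∈ PySem.List.sorted (K.filter pvIsOCA) (fun c => c), (pvRank a).toList = ['2'] := by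
    intro a ha
    rw [pvRank_ofOCA a (List.mem_filter.mp ((PySem.List.mem_sorted _ _ _ _).mp ha)).2]
    decide
  have mLoc : ∀ a ∈ PySem.List.sorted (K.filter pvIsLocal) (fun c => c), (pvRank a).toList = ['4'] := by
    intro a ha
    rw [pvRank_ofLocal a (List.mem_filter.mp ((PySem.List.mem_sorted _ _ _ _).mp ha)).2]
    decide
  have mOC : ∀ a ∈ pvE K "Odoo Community", (pvRank a).toList = ['0'] := by
    intro a ha; rw [(pv_mem_E ha).1]; decide
  have mOE : ∀ a ∈ pvE K "Odoo Enterprise", (pvRank a).toList = ['1'] := by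
    intro a ha; rw [(pv_mem_E ha).1]; decide
  have mTP : ∀ a ∈ pvE K "Third-party", (pvRank a).toList = ['3'] := by
    intro a ha; rw [(pv_mem_E ha).1]; decide
  unfold pvOrder
  refine List.pairwise_append.mpr ⟨List.pairwise_append.mpr ⟨List.pairwise_append.mpr
    ⟨List.pairwise_append.mpr ⟨hE _, hE _, ?_⟩, hs pvIsOCA '2' (fun c hc => by rw [pvRank_ofOCA c hc]; decide), ?_⟩,
    hE _, ?_⟩, hs pvIsLocal '4' (fun c hc => by rw [pvRank_ofLocal c hc]; decide), ?_⟩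
  · intro a ha b hb
    exact crossR a b '0' '1' (mOC a ha) (mOE b hb) (by decide)
  · intro a ha b hb
    rcases List.mem_append.mp ha with ha | ha
    · exact crossR a b '0' '2' (mOC a ha) (mOCA b hb) (by decide)
    · exact crossR a b '1' '2' (mOE a ha) (mOCA b hb) (by decide)
  · intro a ha b hb
    rcases List.mem_append.mp ha with ha | ha
    · rcases List.mem_append.mp ha with ha | ha
      · exact crossR a b '0' '3' (mOC a ha) (mTP b hb) (by decide)
      · exact crossR a b '1' '3' (mOE a ha) (mTP b hb) (by decide)
    · exact crossR a b '2' '3' (mOCA a ha) (mTP b hb) (by decide)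
  · intro a ha b hb
    rcases List.mem_append.mp ha with ha | ha
    · rcases List.mem_append.mp ha with ha | ha
      · rcases List.mem_append.mp ha with ha | ha
        · exact crossR a b '0' '4' (mOC a ha) (mLoc b hb) (by decide)
        · exact crossR a b '1' '4' (mOE a ha) (mLoc b hb) (by decide)
      · exact crossR a b '2' '4' (mOCA a ha) (mLoc b hb) (by decide)
    · exact crossR a b '3' '4' (mTP a ha) (mLoc b hb) (by decide)

theorem pv_sorted_eq (K : List String) (hnd : K.Nodup) :
    PySem.List.sorted K (fun c => pvRank c ++ c) = pvOrder K :=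
  PySem.List.sorted_eq_of_perm_of_pairwise_lt K (pvOrder K) (fun c => pvRank c ++ c)
    (pv_perm K hnd) (pv_pairwise K hnd)

theorem pv_join_cons (x : String) (M : List String) :
    PySem.Str.join "" (x :: M) = x ++ PySem.Str.join "" M := by
  have h : ∀ xss : List (List Char), ([] : List Char).intercalate xss = xss.flatten := by
    intro xss
    simp only [List.intercalate]
    induction xss with
    | nil => rfl
    | cons y ys ih => cases ys <;> simp_all [List.intersperse]
  simp [PySem.Str.join, PySem.Chars.join, h, String.ofList_append]

-- a string-accumulating guarded fold is the join of the kept blocks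
theorem pv_strfold (P : String → Prop) [DecidablePred P] (f : String → String) (L : List String) (s : String) :
    L.foldl (fun nc c => if P c then nc ++ f c else nc) s
      = s ++ PySem.Str.join "" ((L.filter (fun c => decide (P c))).map f) := by
  induction L generalizing s with
  | nil => simp [PySem.Str.join, PySem.Chars.join, List.intercalate, String.append_empty]
  | cons c L ih =>
    by_cases h : P c
    · simp only [List.foldl_cons, if_pos h, List.filter_cons, decide_eq_true h, if_true, List.map_cons]
      rw [ih, pv_join_cons, String.append_assoc]
    · simp only [List.foldl_cons, if_neg h, List.filter_cons]
      rw [ih]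
      simp [h]

-- A's final_order, filtered by key membership, is the emission order
theorem pv_filter_final (d : List (String × List String)) :
    ((["Odoo Community", "Odoo Enterprise"] : List String) ++
        PySem.List.sorted ((List.map (fun x => x.1) d).filter pvIsOCA) (fun c => c) ++ ["Third-party"] ++
        PySem.List.sorted ((List.map (fun x => x.1) d).filter pvIsLocal) (fun c => c)).filter
        (fun c => (PySem.Dict.mk d).contains c)
      = pvOrder (List.map (fun x => x.1) d) := by
  have hc : ∀ c : String, (PySem.Dict.mk d).contains c = decide (c ∈ List.map (fun x => x.1) d) := by
    intro c
    rw [PySem.Dict.contains_eq_decide_mem_keys, PySem.Dict.keys_mk]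
  simp only [hc]
  unfold pvOrder pvE
  simp only [List.filter_append]
  have hs : ∀ p : String → Bool,
      (PySem.List.sorted ((List.map (fun x => x.1) d).filter p) (fun c => c)).filter
          (fun c => decide (c ∈ List.map (fun x => x.1) d))
        = PySem.List.sorted ((List.map (fun x => x.1) d).filter p) (fun c => c) := by
    intro p
    refine List.filter_eq_self.mpr ?_
    intro a ha
    exact decide_eq_true ((List.mem_filter.mp ((PySem.List.mem_sorted _ _ _ _).mp ha)).1)
  rw [hs, hs]
  by_cases h1 : ("Odoo Community" : String) ∈ List.map (fun x => x.1) d <;>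
    by_cases h2 : ("Odoo Enterprise" : String) ∈ List.map (fun x => x.1) d <;>
      by_cases h3 : ("Third-party" : String) ∈ List.map (fun x => x.1) d <;>
        simp [h1, h2, h3, List.append_assoc]

theorem pv_main (d : List (String × List String))
    (hnd : (d.map Prod.fst).Nodup) :
    generate_depends_sections_py d = generate_depends_sections_py_alt d := by
  unfold generate_depends_sections_py generate_depends_sections_py_alt
  simp only [PySem.Dict.keys_mk]
  rw [pv_buckets]
  simp only [List.nil_append]
  rw [PySem.List.foldl_if_eq_foldl_filter (p := fun c => (PySem.Dict.mk d).contains c)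
        (f := fun nc c => if (PySem.Dict.mk d).getD c [] ≠ [] then nc ++ pvBlock c ((PySem.Dict.mk d).getD c []) else nc)]
  rw [pv_filter_final d]
  rw [pv_strfold (P := fun c => (PySem.Dict.mk d).getD c [] ≠ [])
        (f := fun c => pvBlock c ((PySem.Dict.mk d).getD c []))]
  rw [PySem.List.foldl_append_ite (p := fun c => (PySem.Dict.mk d).getD c [] ≠ [])
        (f := fun c => pvBlock c ((PySem.Dict.mk d).getD c []))]
  rw [pv_sorted_eq (List.map (fun x => x.1) d) hnd]
  simp only [List.nil_append]

-- ===== VERDICT (by name: the statement is the Claim_ definition above) =====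

theorem generate_depends_sections_py_spec : Claim_equal_generate_depends_sections_py := by
  intro d _ hpre
  unfold Spec_generate_depends_sections_py
  exact pv_main d hpre
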